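-- pv_equiv track=rewrite | github.com/jk-jung/problem-solving | codewars/5kyu/5_Simple Fun #118: Sum Or Product.py | sum_or_product
-- ===== SOURCE A (Python) =====
-- def sum_or_product(v):
--     while len(v) > 1:
--         v.sort()
--
--         if v[0] == 1:
--             if 2 in v: v[v.index(2)] += 1
--             else: v[1] += 1
--         else:
--             v[1] *= v[0]
--         v = v[1:]
--
--     return v[0]
-- ===== SOURCE B (Python) =====
-- def sum_or_product(v):
--     # sort once, then keep the working list sorted: each combined value is put
--     # back with a hand-written binary-search ordered insert
--     w = sorted(v)
--     while len(w) > 1: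
--         a = w[0]
--         if a == 1:
--             if 2 in w:
--                 new = 3
--                 w.remove(2)
--                 del w[0]
--             else:
--                 new = w[1] + 1
--                 del w[:2]
--         else:
--             new = a * w[1]
--             del w[:2]
--         lo, hi = 0, len(w)
--         while lo < hi:
--             mid = (lo + hi) // 2
--             if w[mid] < new:
--                 lo = mid + 1
--             else:
--                 hi = mid
--         w.insert(lo, new)
--     return w[0]
-- ===== Notes on version B (the rewrite author's own statement) =====
-- stated objective: faster
-- what changed: A re-sorts the whole working list on every iteration and patches an element in place; B sorts once and then keeps the list sorted by re-inserting each newly combined value at a binary-searched position.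
import Mathlib
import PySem

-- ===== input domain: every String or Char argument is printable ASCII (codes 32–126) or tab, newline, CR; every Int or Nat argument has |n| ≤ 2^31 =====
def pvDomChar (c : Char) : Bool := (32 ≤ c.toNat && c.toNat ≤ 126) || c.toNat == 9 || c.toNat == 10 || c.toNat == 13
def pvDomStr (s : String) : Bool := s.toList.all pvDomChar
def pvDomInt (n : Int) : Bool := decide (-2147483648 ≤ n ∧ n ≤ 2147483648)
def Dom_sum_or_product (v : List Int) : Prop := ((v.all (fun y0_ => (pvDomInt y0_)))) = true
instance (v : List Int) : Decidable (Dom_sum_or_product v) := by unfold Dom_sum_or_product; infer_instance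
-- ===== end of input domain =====

-- B replaces A's full re-sort of the working list on every iteration by a single initial
-- sort plus a binary-search ordered insert of each newly combined value (objective: faster,
-- constant/log-factor mechanism measured). A mutates its argument
-- (in-place sort on the first iteration); the equivalence proved is about the return value only.

-- ===== PORT A =====
-- the loop body of A on the freshly sorted list: modify one element in place
def aModify (s : List Int) : List Int :=
  if s.getD 0 0 = 1 then
    if s.contains 2 then
      match PySem.List.index? s 2 with              -- v[v.index(2)] += 1
      | some i => s.set i (s.getD i 0 + 1)
      | none => s                                   -- unreachable: 2 ∈ s
    else s.set 1 (s.getD 1 0 + 1)                   -- v[1] += 1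
  else s.set 1 (s.getD 1 0 * s.getD 0 0)            -- v[1] *= v[0]

lemma length_aModify (s : List Int) : (aModify s).length = s.length := by
  unfold aModify
  split
  · split
    · split <;> simp
    · simp
  · simp

-- literal transliteration of A: re-sort each iteration, modify in place, drop the head
def sum_or_product (v : List Int) : Int :=
  if _h : 1 < v.length then
    sum_or_product ((aModify (PySem.List.sorted v (fun x => x))).tail)   -- v = v[1:]
  else v.getD 0 0                                   -- return v[0] (Pre_ gives v ≠ [])
termination_by v.length
decreasing_by
  simp only [List.length_tail, length_aModify, PySem.List.length_sorted]
  omega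

-- ===== PORT B =====
-- Source B's hand-written binary search: first index in [lo, hi) whose element is ≥ x
def bsearchAlt (w : List Int) (x : Int) (lo hi : Int) : Int :=
  if _h : lo < hi then
    let mid := PySem.Int.floordiv (lo + hi) 2
    if w.getD mid.toNat 0 < x then bsearchAlt w x (mid + 1) hi
    else bsearchAlt w x lo mid
  else lo
termination_by (hi - lo).toNat
decreasing_by
  all_goals
    have h1 : lo ≤ PySem.Int.floordiv (lo + hi) 2 :=
      (PySem.Int.le_floordiv_iff_mul_le (by norm_num)).mpr (by omega)
    have h2 : PySem.Int.floordiv (lo + hi) 2 < hi :=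
      (PySem.Int.floordiv_lt_iff_lt_mul (by norm_num)).mpr (by omega)
    omega

lemma length_remove2_getD (l : List Int) (h : (2 : Int) ∈ l) :
    ((PySem.List.remove? l 2).getD l).length + 1 = l.length := by
  rw [PySem.List.remove?_eq_some_erase l 2 h]
  have := List.length_pos_of_mem h
  simp [List.length_erase_of_mem h]
  omega

-- the while loop of Source B, on the sorted working list
def altLoop (w : List Int) : Int :=
  match w with
  | [] => 0                                          -- unreachable under Pre_ (w[0] raises)
  | [x] => x
  | a :: b :: rest =>
    if a = 1 then
      if h2 : (a :: b :: rest).contains 2 then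
        -- new = 3; w.remove(2); del w[0]
        let r := ((PySem.List.remove? (a :: b :: rest) 2).getD (a :: b :: rest)).tail
        altLoop (PySem.List.insert r (bsearchAlt r 3 0 (PySem.List.len r)) 3)
      else
        -- new = w[1] + 1; del w[:2]
        altLoop (PySem.List.insert rest (bsearchAlt rest (b + 1) 0 (PySem.List.len rest)) (b + 1))
    else
      -- new = a * w[1]; del w[:2]
      altLoop (PySem.List.insert rest (bsearchAlt rest (a * b) 0 (PySem.List.len rest)) (a * b))
termination_by w.length
decreasing_by
  · have hm : (2 : Int) ∈ a :: b :: rest := List.contains_iff_mem.mp h2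
    have := length_remove2_getD (a :: b :: rest) hm
    simp only [PySem.List.length_insert, List.length_tail]
    simp at this ⊢
    omega
  · simp [PySem.List.length_insert]
  · simp [PySem.List.length_insert]

def sum_or_product_alt (v : List Int) : Int :=
  altLoop (PySem.List.sorted v (fun x => x))         -- w = sorted(v)

-- ===== PRECONDITION & SPEC =====
-- Pre_ excludes only the empty list, on which Python A raises IndexError (v[0]).
def Pre_sum_or_product (v : List Int) : Prop := v ≠ []
instance (v : List Int) : Decidable (Pre_sum_or_product v) := by unfold Pre_sum_or_product; infer_instance
def pvWitness_sum_or_product : List Int := [1, 2, 3]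
def Spec_sum_or_product (v : List Int) (out : Int) : Prop := out = sum_or_product_alt v
instance (v : List Int) (out : Int) : Decidable (Spec_sum_or_product v out) := by unfold Spec_sum_or_product; infer_instance

-- ===== CLAIM (what is proved, stated in full; the proofs are below) =====
def Claim_equal_sum_or_product : Prop := ∀ (v : List Int), Dom_sum_or_product v → Pre_sum_or_product v → Spec_sum_or_product v (sum_or_product v)

-- ===== LEMMAS AND PROOFS =====

lemma getD_mono_of_pairwise (w : List Int) (hs : w.Pairwise (· ≤ ·)) (k m : Nat)
    (hkm : k ≤ m) (hm : m < w.length) : w.getD k 0 ≤ w.getD m 0 := by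
  rcases Nat.lt_or_ge k m with h | h
  · rw [List.getD_eq_getElem w 0 (by omega), List.getD_eq_getElem w 0 hm]
    exact List.pairwise_iff_getElem.mp hs k m (by omega) hm h
  · have : k = m := by omega
    subst this; rfl

-- the binary search returns a split point: everything below is < x, everything above is ≥ x
lemma bsearchAlt_spec (w : List Int) (x : Int) (hs : w.Pairwise (· ≤ ·)) :
    ∀ (d : Nat) (lo hi : Int), (hi - lo).toNat = d → 0 ≤ lo → lo ≤ hi → hi ≤ (w.length : Int) →
    (∀ k : Nat, k < w.length → (k : Int) < lo → w.getD k 0 < x) →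
    (∀ k : Nat, k < w.length → hi ≤ (k : Int) → x ≤ w.getD k 0) →
    0 ≤ bsearchAlt w x lo hi ∧ bsearchAlt w x lo hi ≤ (w.length : Int) ∧
    (∀ k : Nat, k < w.length → (k : Int) < bsearchAlt w x lo hi → w.getD k 0 < x) ∧
    (∀ k : Nat, k < w.length → bsearchAlt w x lo hi ≤ (k : Int) → x ≤ w.getD k 0) := by
  intro d
  induction d using Nat.strong_induction_on with
  | _ d ih =>
    intro lo hi hd h0 hlh hhl hlow hhigh
    rw [bsearchAlt.eq_def]
    by_cases hcond : lo < hi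
    · rw [dif_pos hcond]
      have hmid1 : lo ≤ PySem.Int.floordiv (lo + hi) 2 :=
        (PySem.Int.le_floordiv_iff_mul_le (by norm_num)).mpr (by omega)
      have hmid2 : PySem.Int.floordiv (lo + hi) 2 < hi :=
        (PySem.Int.floordiv_lt_iff_lt_mul (by norm_num)).mpr (by omega)
      set mid := PySem.Int.floordiv (lo + hi) 2 with hmid
      have hmlen : mid.toNat < w.length := by omega
      have hmcast : (mid.toNat : Int) = mid := by omega
      by_cases hc : w.getD mid.toNat 0 < x
      · rw [if_pos hc]
        refine ih (hi - (mid + 1)).toNat (by omega) (mid + 1) hi (by rfl) (by omega) (by omega) hhl ?_ hhigh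
        intro k hk hklt
        calc w.getD k 0 ≤ w.getD mid.toNat 0 := getD_mono_of_pairwise w hs k mid.toNat (by omega) hmlen
          _ < x := hc
      · rw [if_neg hc]
        refine ih (mid - lo).toNat (by omega) lo mid (by rfl) h0 (by omega) (by omega) hlow ?_
        intro k hk hkge
        calc x ≤ w.getD mid.toNat 0 := by omega
          _ ≤ w.getD k 0 := getD_mono_of_pairwise w hs mid.toNat k (by omega) hk
    · rw [dif_neg hcond]
      have : lo = hi := by omega
      exact ⟨h0, by omega, hlow, fun k hk hge => hhigh k hk (by omega)⟩

lemma take_append_cons_drop_perm (n : Nat) (x : Int) (l : List Int) :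
    (l.take n ++ x :: l.drop n).Perm (x :: l) := by
  induction l generalizing n with
  | nil => simp
  | cons y ys ih =>
    cases n with
    | zero => simp
    | succ m =>
      simp only [List.take_succ_cons, List.drop_succ_cons, List.cons_append]
      exact ((ih m).cons y).trans (List.Perm.swap x y ys)

-- inserting x at the binary-search position keeps the list sorted and adds exactly x
lemma insert_bsearch_ok (w : List Int) (x : Int) (hs : w.Pairwise (· ≤ ·)) :
    (PySem.List.insert w (bsearchAlt w x 0 (PySem.List.len w)) x).Perm (x :: w) ∧
    (PySem.List.insert w (bsearchAlt w x 0 (PySem.List.len w)) x).Pairwise (· ≤ ·) := by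
  have hlen : PySem.List.len w = (w.length : Int) := by simp [PySem.List.len]
  obtain ⟨hj0, hjlen, hlow, hhigh⟩ :=
    bsearchAlt_spec w x hs (w.length : Int).toNat 0 (w.length : Int) (by omega) le_rfl
      (by omega) le_rfl (by intro k hk hklt; omega) (by intro k hk hge; omega)
  rw [hlen]
  set j := bsearchAlt w x 0 (w.length : Int) with hj
  have hjcast : ((j.toNat : Nat) : Int) = j := by omega
  have hjle : j.toNat ≤ w.length := by omega
  have hins : PySem.List.insert w j x = w.take j.toNat ++ x :: w.drop j.toNat := by
    rw [← hjcast]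
    exact PySem.List.insert_natCast w j.toNat x hjle
  rw [hins]
  constructor
  · exact take_append_cons_drop_perm j.toNat x w
  · rw [List.pairwise_append]
    refine ⟨hs.sublist (List.take_sublist ..), ?_, ?_⟩
    · rw [List.pairwise_cons]
      refine ⟨?_, hs.sublist (List.drop_sublist ..)⟩
      intro z hz
      obtain ⟨k, hk, hzk⟩ := List.mem_iff_getElem.mp hz
      rw [List.getElem_drop] at hzk
      have hkl : j.toNat + k < w.length := by
        have := hk; simp [List.length_drop] at this; omega
      have := hhigh (j.toNat + k) hkl (by omega)
      rw [List.getD_eq_getElem w 0 hkl] at this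
      omega
    · intro a ha b hb
      obtain ⟨k, hk, hak⟩ := List.mem_iff_getElem.mp ha
      rw [List.getElem_take] at hak
      have hkj : k < j.toNat := by
        have := hk; simp [List.length_take] at this; omega
      have hkl : k < w.length := by omega
      have hax : a < x := by
        have := hlow k hkl (by omega)
        rw [List.getD_eq_getElem w 0 hkl] at this
        omega
      rcases List.mem_cons.mp hb with hbx | hbd
      · omega
      · obtain ⟨m, hm, hbm⟩ := List.mem_iff_getElem.mp hbd
        rw [List.getElem_drop] at hbm
        have hml : j.toNat + m < w.length := by
          have := hm; simp [List.length_drop] at this; omega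
        have := hhigh (j.toNat + m) hml (by omega)
        rw [List.getD_eq_getElem w 0 hml] at this
        omega

-- A's "v[v.index(2)] += 1" as a multiset operation: replace the first 2 by 3
lemma set_index2_perm : ∀ (l : List Int), (2 : Int) ∈ l → ∀ i,
    PySem.List.index? l 2 = some i → (l.set i (l.getD i 0 + 1)).Perm (3 :: l.erase 2) := by
  intro l
  induction l with
  | nil => intro h; cases h
  | cons x xs ih =>
    intro hm i hi
    by_cases hx : x = 2
    · subst hx
      rw [PySem.List.index?_cons_self] at hi
      cases hi
      have : ((2 : Int) :: xs).set 0 (((2 : Int) :: xs).getD 0 0 + 1) = 3 :: xs := by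
        norm_num [List.getD]
      rw [this, List.erase_cons_head]
    · rw [PySem.List.index?_cons_of_ne xs hx] at hi
      have hm' : (2 : Int) ∈ xs := by
        rcases List.mem_cons.mp hm with h | h
        · exact absurd h.symm hx
        · exact h
      cases hj : PySem.List.index? xs 2 with
      | none => rw [hj] at hi; cases hi
      | some j =>
        rw [hj] at hi
        simp at hi
        subst hi
        have hstep : (x :: xs).set (j + 1) ((x :: xs).getD (j + 1) 0 + 1)
             = x :: xs.set j (xs.getD j 0 + 1) := by
          simp [List.getD]
        have herase : (x :: xs).erase 2 = x :: xs.erase 2 := by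
          rw [List.erase_cons_tail]
          simp [hx]
        rw [hstep, herase]
        exact ((ih hm' j hj).cons x).trans (List.Perm.swap 3 x (xs.erase 2))

-- core invariant: A on any v equals B's loop on any sorted rearrangement of v
lemma main_invariant : ∀ (n : Nat) (v w : List Int), v.length = n →
    w.Perm v → w.Pairwise (· ≤ ·) → sum_or_product v = altLoop w := by
  intro n
  induction n using Nat.strong_induction_on with
  | _ n ih =>
    intro v w hlen hperm hpair
    have hsorted : PySem.List.sorted v (fun x => x) = w :=
      PySem.List.sorted_id_eq_of_perm_of_pairwise v w hperm hpair
    cases w with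
    | nil =>
      have hv : v = [] := hperm.symm.eq_nil
      subst hv
      rw [sum_or_product.eq_def]
      simp [altLoop]
    | cons a t =>
      cases t with
      | nil =>
        have hv : v = [a] := (List.singleton_perm.mp hperm).symm
        subst hv
        rw [sum_or_product.eq_def]
        simp [altLoop, List.getD]
      | cons b rest =>
        have hvl : v.length = rest.length + 2 := by
          rw [← hperm.length_eq]; simp
        have hgt : 1 < v.length := by omega
        rw [sum_or_product.eq_def]
        rw [dif_pos hgt, hsorted]
        have hpairt : (b :: rest).Pairwise (· ≤ ·) := hpair.of_cons
        have hpairr : rest.Pairwise (· ≤ ·) := hpairt.of_cons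
        by_cases ha : a = 1
        · by_cases hc : (a :: b :: rest).contains 2
          · -- 1-branch, a 2 is present
            have hm : (2 : Int) ∈ b :: rest := by
              rcases List.mem_cons.mp (List.contains_iff_mem.mp hc) with h' | h'
              · omega
              · exact h'
            have ha2 : a ≠ 2 := by omega
            obtain ⟨i, hi⟩ : ∃ i, PySem.List.index? (b :: rest) 2 = some i :=
              Option.isSome_iff_exists.mp ((PySem.List.index?_isSome_iff (b :: rest) 2).mpr hm)
            have hidx : PySem.List.index? (a :: b :: rest) 2 = some (i + 1) := by
              rw [PySem.List.index?_cons_of_ne _ ha2, hi]; rfl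
            have hmod : aModify (a :: b :: rest)
                = a :: (b :: rest).set i ((b :: rest).getD i 0 + 1) := by
              unfold aModify
              rw [if_pos (by simp [List.getD, ha]), if_pos hc, hidx]
              simp [List.getD]
            rw [hmod]
            simp only [List.tail_cons]
            rw [altLoop.eq_def]
            simp only [if_pos ha, dif_pos hc]
            have hr : ((PySem.List.remove? (a :: b :: rest) 2).getD (a :: b :: rest)).tail
                = (b :: rest).erase 2 := by
              rw [PySem.List.remove?_eq_some_erase _ 2 (List.contains_iff_mem.mp hc)]
              rw [List.erase_cons_tail]
              · simp
              · simp [ha2]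
            rw [hr]
            have hpe : ((b :: rest).erase 2).Pairwise (· ≤ ·) :=
              hpairt.sublist (List.erase_sublist ..)
            obtain ⟨hperm', hpair'⟩ := insert_bsearch_ok ((b :: rest).erase 2) 3 hpe
            refine ih (n - 1) (by omega) _ _ ?_ ?_ hpair'
            · simp; omega
            · exact hperm'.trans (set_index2_perm (b :: rest) hm i hi).symm
          · -- 1-branch, no 2 anywhere
            have hmod : aModify (a :: b :: rest) = a :: (b + 1) :: rest := by
              unfold aModify
              rw [if_pos (by simp [List.getD, ha]), if_neg hc]
              simp [List.getD]
            rw [hmod]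
            simp only [List.tail_cons]
            rw [altLoop.eq_def]
            simp only [if_pos ha, dif_neg hc]
            obtain ⟨hperm', hpair'⟩ := insert_bsearch_ok rest (b + 1) hpairr
            refine ih (n - 1) (by omega) _ _ ?_ hperm' hpair'
            simp; omega
        · -- product branch
          have hmod : aModify (a :: b :: rest) = a :: (a * b) :: rest := by
            unfold aModify
            rw [if_neg (by simp [List.getD, ha])]
            simp [List.getD, Int.mul_comm]
          rw [hmod]
          simp only [List.tail_cons]
          rw [altLoop.eq_def]
          simp only [if_neg ha]
          obtain ⟨hperm', hpair'⟩ := insert_bsearch_ok rest (a * b) hpairr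
          refine ih (n - 1) (by omega) _ _ ?_ hperm' hpair'
          simp; omega
        
-- ===== VERDICT (by name: the statement is the Claim_ definition above) =====
theorem sum_or_product_spec : Claim_equal_sum_or_product := by
  intro v _ _
  unfold Spec_sum_or_product sum_or_product_alt
  exact main_invariant v.length v (PySem.List.sorted v (fun x => x)) rfl
    (PySem.List.sorted_perm v (fun x => x) false)
    (by simpa using PySem.List.sorted_pairwise v (fun x => x))
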